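-- pv_equiv track=rewrite | github.com/stewari1210/Vedic-Sanskrit-Tutor | extract_brahmana_proper_nouns.py | categorize_brahmana_nouns
-- ===== SOURCE A (Python) =====
-- from typing import Dict, List, Set, Tuple
--
-- def categorize_brahmana_nouns(nouns: Dict[str, int]) -> Dict[str, Dict[str, int]]:
--     """Categorize nouns by type (sages, tribes, deities, etc.)."""
--     categories = {
--         'sages_rishis': {},
--         'kings_rulers': {},
--         'tribes_peoples': {},
--         'deities': {},
--         'places_rivers': {},
--         'schools_traditions': {},
--         'other': {}
--     }
--
--     # Sage/Rishi indicators
--     sage_indicators = ['rishi', 'sage', 'priest', 'seer', ' rsi', 'muni']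
--     known_sages = [
--         'Vasishtha', 'Vasistha', 'Vashishta', 'Vishwamitra', 'Visvamitra', 'Kashyapa', 'Kasyapa',
--         'Atri', 'Bharadvaja', 'Gautama', 'Jamadagni', 'Kanva', 'Angiras', 'Bhrigu', 'Chyavana',
--         'Dadhyanch', 'Gotama', 'Agastya', 'Agasti', 'Grtsamada', 'Yajnavalkya', 'Yama', 'Sanatkumara'
--     ]
--
--     # King/Ruler indicators
--     king_indicators = ['king', 'ruler', 'prince', 'chieftain', 'sovereign']
--     known_kings = [
--         'Sudas', 'Divodasa', 'Trasadasyu', 'Kurusravana', 'Pakasthaman', 'Pururavas',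
--         'Yayati', 'Nahusha', 'Mudgala', 'Pratardana', 'Janamejaya', 'Parikshit'
--     ]
--
--     # Tribe indicators
--     tribe_indicators = ['tribe', 'people', 'clan', 'folk', 'race', 'nation']
--     known_tribes = [
--         'Bharatas', 'Bharata', 'Kurus', 'Panchalas', 'Turvashas', 'Krivis', 'Srinjayas',
--         'Somakas', 'Keshins', 'Trtsus', 'Tritsu', 'Pakthas', 'Alinas', 'Bhalanas',
--         'Sivas', 'Visanins', 'Anu', 'Druhyu', 'Matsyas', 'Yaksus'
--     ]
--
--     # Deity indicators
--     deity_indicators = ['god', 'goddess', 'deva', 'devi', 'divine']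
--     known_deities = [
--         'Indra', 'Agni', 'Soma', 'Varuna', 'Vishnu', 'Rudra', 'Brahma', 'Prajapati',
--         'Savitr', 'Pushan', 'Bhaga', 'Aryaman', 'Mitra', 'Aditi', 'Ushas', 'Ashvins',
--         'Maruts', 'Vayu', 'Parjanya', 'Apam', 'Napat', 'Vishwakarma', 'Tvastr',
--         'Dadhikra', 'Ahi', 'Vrtra', 'Vala', 'Namuchi', 'Sushna', 'Kuyava'
--     ]
--
--     # Place/River indicators
--     place_indicators = ['river', 'mountain', 'place', 'region', 'land', 'country']
--     known_places = [
--         'Ganga', 'Yamuna', 'Saraswati', 'Sindhu', 'Vipas', 'Sutudri', 'Parushni',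
--         'Asikni', 'Marudvridha', 'Arjikiya', 'Sushoma', 'Kurukshetra', 'Himavant',
--         'Meru', 'Mandara', 'Uttarakuru', 'Bharatavarsa'
--     ]
--
--     # School/Tradition indicators
--     school_indicators = ['school', 'tradition', 'recension', 'shakha', 'branch']
--     known_schools = [
--         'Madhyandina', 'Kanva', 'Taittiriya', 'Kathaka', 'Kapishthala', 'Maithrayani',
--         'Varaha', 'Satyayana', 'Saunaka', 'Sakala', 'Baskala', 'Asvalayana',
--         'Sankhayana', 'Latayayana', 'Drashtara', 'Apastamba', 'Hiranyakesin',
--         'Baudhayana', 'Vaikhanasa'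
--     ]
--
--     for noun, count in nouns.items():
--         noun_lower = noun.lower()
--
--         # Check categories
--         if any(sage in noun_lower for sage in sage_indicators) or noun in known_sages:
--             categories['sages_rishis'][noun] = count
--         elif any(king in noun_lower for king in king_indicators) or noun in known_kings:
--             categories['kings_rulers'][noun] = count
--         elif any(tribe in noun_lower for tribe in tribe_indicators) or noun in known_tribes:
--             categories['tribes_peoples'][noun] = count
--         elif any(deity in noun_lower for deity in deity_indicators) or noun in known_deities:
--             categories['deities'][noun] = count
--         elif any(place in noun_lower for place in place_indicators) or noun in known_places:
--             categories['places_rivers'][noun] = count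
--         elif any(school in noun_lower for school in school_indicators) or noun in known_schools:
--             categories['schools_traditions'][noun] = count
--         else:
--             categories['other'][noun] = count
--
--     return categories
-- ===== SOURCE B (Python) =====
-- from typing import Dict
--
-- _CATEGORY_NAMES = ['sages_rishis', 'kings_rulers', 'tribes_peoples', 'deities',
--                    'places_rivers', 'schools_traditions', 'other']
--
-- # per-category indicator lists and known-name lists, packed as comma-separated strings
-- _INDICATORS = [s.split(',') for s in [
--     "rishi,sage,priest,seer, rsi,muni",
--     "king,ruler,prince,chieftain,sovereign",
--     "tribe,people,clan,folk,race,nation",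
--     "god,goddess,deva,devi,divine",
--     "river,mountain,place,region,land,country",
--     "school,tradition,recension,shakha,branch",
-- ]]
-- _KNOWN = [s.split(',') for s in [
--     "Vasishtha,Vasistha,Vashishta,Vishwamitra,Visvamitra,Kashyapa,Kasyapa,Atri,Bharadvaja,Gautama,Jamadagni,Kanva,Angiras,Bhrigu,Chyavana,Dadhyanch,Gotama,Agastya,Agasti,Grtsamada,Yajnavalkya,Yama,Sanatkumara",
--     "Sudas,Divodasa,Trasadasyu,Kurusravana,Pakasthaman,Pururavas,Yayati,Nahusha,Mudgala,Pratardana,Janamejaya,Parikshit",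
--     "Bharatas,Bharata,Kurus,Panchalas,Turvashas,Krivis,Srinjayas,Somakas,Keshins,Trtsus,Tritsu,Pakthas,Alinas,Bhalanas,Sivas,Visanins,Anu,Druhyu,Matsyas,Yaksus",
--     "Indra,Agni,Soma,Varuna,Vishnu,Rudra,Brahma,Prajapati,Savitr,Pushan,Bhaga,Aryaman,Mitra,Aditi,Ushas,Ashvins,Maruts,Vayu,Parjanya,Apam,Napat,Vishwakarma,Tvastr,Dadhikra,Ahi,Vrtra,Vala,Namuchi,Sushna,Kuyava",
--     "Ganga,Yamuna,Saraswati,Sindhu,Vipas,Sutudri,Parushni,Asikni,Marudvridha,Arjikiya,Sushoma,Kurukshetra,Himavant,Meru,Mandara,Uttarakuru,Bharatavarsa",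
--     "Madhyandina,Kanva,Taittiriya,Kathaka,Kapishthala,Maithrayani,Varaha,Satyayana,Saunaka,Sakala,Baskala,Asvalayana,Sankhayana,Latayayana,Drashtara,Apastamba,Hiranyakesin,Baudhayana,Vaikhanasa",
-- ]]
--
--
-- def _category_index(noun: str) -> int:
--     """Index of a noun's category: the earlier of its first indicator hit and
--     its first known-name hit; 6 (= 'other') if neither occurs."""
--     lower = noun.lower()
--     ind_idx = next((i for i, inds in enumerate(_INDICATORS)
--                     if any(s in lower for s in inds)), len(_INDICATORS))
--     name_idx = next((i for i, names in enumerate(_KNOWN) if noun in names), len(_KNOWN))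
--     return min(ind_idx, name_idx)
--
--
-- def categorize_brahmana_nouns(nouns: Dict[str, int]) -> Dict[str, Dict[str, int]]:
--     """Categorize nouns by type (sages, tribes, deities, etc.)."""
--     buckets = [{} for _ in _CATEGORY_NAMES]
--     for noun, count in nouns.items():
--         buckets[_category_index(noun)][noun] = count
--     return dict(zip(_CATEGORY_NAMES, buckets))
-- ===== Notes on version B (the rewrite author's own statement) =====
-- stated objective: alternative
-- what changed: Replaces the seven-branch if/elif chain over per-category named dicts by a numeric classifier (minimum of the first indicator hit and the first known-name hit over packed comma-separated data tables) indexing into a list of seven buckets.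
import Mathlib
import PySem

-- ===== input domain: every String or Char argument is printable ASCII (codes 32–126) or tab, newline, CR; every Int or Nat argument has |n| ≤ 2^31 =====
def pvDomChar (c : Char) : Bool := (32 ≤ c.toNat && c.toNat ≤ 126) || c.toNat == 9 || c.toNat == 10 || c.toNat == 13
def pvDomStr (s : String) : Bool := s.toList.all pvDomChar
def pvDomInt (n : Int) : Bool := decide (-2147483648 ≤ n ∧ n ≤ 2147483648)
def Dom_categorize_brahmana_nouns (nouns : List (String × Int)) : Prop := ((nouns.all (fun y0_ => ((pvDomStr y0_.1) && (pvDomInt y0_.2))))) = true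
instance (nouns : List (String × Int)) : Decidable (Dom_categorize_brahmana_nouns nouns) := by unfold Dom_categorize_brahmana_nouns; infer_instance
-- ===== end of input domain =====

-- B replaces A's seven-way if/elif chain over per-category named dicts by a numeric
-- first-match index (the minimum of the first indicator hit and the first known-name
-- hit over packed data tables) into a list of seven buckets (objective: simpler).

-- ===== PORT A =====
-- A's literal indicator / known-name lists
def sageIndicators : List String := ["rishi", "sage", "priest", "seer", " rsi", "muni"]
def knownSages : List String :=
  ["Vasishtha", "Vasistha", "Vashishta", "Vishwamitra", "Visvamitra", "Kashyapa", "Kasyapa",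
   "Atri", "Bharadvaja", "Gautama", "Jamadagni", "Kanva", "Angiras", "Bhrigu", "Chyavana",
   "Dadhyanch", "Gotama", "Agastya", "Agasti", "Grtsamada", "Yajnavalkya", "Yama", "Sanatkumara"]
def kingIndicators : List String := ["king", "ruler", "prince", "chieftain", "sovereign"]
def knownKings : List String :=
  ["Sudas", "Divodasa", "Trasadasyu", "Kurusravana", "Pakasthaman", "Pururavas",
   "Yayati", "Nahusha", "Mudgala", "Pratardana", "Janamejaya", "Parikshit"]
def tribeIndicators : List String := ["tribe", "people", "clan", "folk", "race", "nation"]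
def knownTribes : List String :=
  ["Bharatas", "Bharata", "Kurus", "Panchalas", "Turvashas", "Krivis", "Srinjayas",
   "Somakas", "Keshins", "Trtsus", "Tritsu", "Pakthas", "Alinas", "Bhalanas",
   "Sivas", "Visanins", "Anu", "Druhyu", "Matsyas", "Yaksus"]
def deityIndicators : List String := ["god", "goddess", "deva", "devi", "divine"]
def knownDeities : List String :=
  ["Indra", "Agni", "Soma", "Varuna", "Vishnu", "Rudra", "Brahma", "Prajapati",
   "Savitr", "Pushan", "Bhaga", "Aryaman", "Mitra", "Aditi", "Ushas", "Ashvins",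
   "Maruts", "Vayu", "Parjanya", "Apam", "Napat", "Vishwakarma", "Tvastr",
   "Dadhikra", "Ahi", "Vrtra", "Vala", "Namuchi", "Sushna", "Kuyava"]
def placeIndicators : List String := ["river", "mountain", "place", "region", "land", "country"]
def knownPlaces : List String :=
  ["Ganga", "Yamuna", "Saraswati", "Sindhu", "Vipas", "Sutudri", "Parushni",
   "Asikni", "Marudvridha", "Arjikiya", "Sushoma", "Kurukshetra", "Himavant",
   "Meru", "Mandara", "Uttarakuru", "Bharatavarsa"]
def schoolIndicators : List String := ["school", "tradition", "recension", "shakha", "branch"]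
def knownSchools : List String :=
  ["Madhyandina", "Kanva", "Taittiriya", "Kathaka", "Kapishthala", "Maithrayani",
   "Varaha", "Satyayana", "Saunaka", "Sakala", "Baskala", "Asvalayana",
   "Sankhayana", "Latayayana", "Drashtara", "Apastamba", "Hiranyakesin",
   "Baudhayana", "Vaikhanasa"]

-- state of A's loop: the seven inner category dicts
structure ACats where
  sages : PySem.Dict String Int
  kings : PySem.Dict String Int
  tribes : PySem.Dict String Int
  deities : PySem.Dict String Int
  places : PySem.Dict String Int
  schools : PySem.Dict String Int
  other : PySem.Dict String Int
  deriving Repr, DecidableEq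

-- one iteration of A's for-loop: the if/elif chain, in source order
def aStep (st : ACats) (noun : String) (count : Int) : ACats :=
  let noun_lower := PySem.Str.lower noun
  if sageIndicators.any (fun sage => PySem.Str.isIn sage noun_lower) || knownSages.contains noun then
    { st with sages := st.sages.insert noun count }
  else if kingIndicators.any (fun king => PySem.Str.isIn king noun_lower) || knownKings.contains noun then
    { st with kings := st.kings.insert noun count }
  else if tribeIndicators.any (fun tribe => PySem.Str.isIn tribe noun_lower) || knownTribes.contains noun then
    { st with tribes := st.tribes.insert noun count }
  else if deityIndicators.any (fun deity => PySem.Str.isIn deity noun_lower) || knownDeities.contains noun then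
    { st with deities := st.deities.insert noun count }
  else if placeIndicators.any (fun place => PySem.Str.isIn place noun_lower) || knownPlaces.contains noun then
    { st with places := st.places.insert noun count }
  else if schoolIndicators.any (fun school => PySem.Str.isIn school noun_lower) || knownSchools.contains noun then
    { st with schools := st.schools.insert noun count }
  else
    { st with other := st.other.insert noun count }

def categorize_brahmana_nouns (nouns : List (String × Int)) : List (String × List (String × Int)) :=
  let init : ACats := ⟨.empty, .empty, .empty, .empty, .empty, .empty, .empty⟩
  let fin := nouns.foldl (fun st p => aStep st p.1 p.2) init
  [("sages_rishis", fin.sages.items), ("kings_rulers", fin.kings.items),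
   ("tribes_peoples", fin.tribes.items), ("deities", fin.deities.items),
   ("places_rivers", fin.places.items), ("schools_traditions", fin.schools.items),
   ("other", fin.other.items)]

-- ===== PORT B =====
def bCategoryNames : List String :=
  ["sages_rishis", "kings_rulers", "tribes_peoples", "deities",
   "places_rivers", "schools_traditions", "other"]

-- the packed data tables of Source B, split on commas at definition time
def bIndicators : List (List String) :=
  ["rishi,sage,priest,seer, rsi,muni",
   "king,ruler,prince,chieftain,sovereign",
   "tribe,people,clan,folk,race,nation",
   "god,goddess,deva,devi,divine",
   "river,mountain,place,region,land,country",
   "school,tradition,recension,shakha,branch"].map (fun s => (PySem.Str.split? s ",").getD [])  -- sep "," ≠ "", so split? is exact here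

def bKnown : List (List String) :=
  ["Vasishtha,Vasistha,Vashishta,Vishwamitra,Visvamitra,Kashyapa,Kasyapa,Atri,Bharadvaja,Gautama,Jamadagni,Kanva,Angiras,Bhrigu,Chyavana,Dadhyanch,Gotama,Agastya,Agasti,Grtsamada,Yajnavalkya,Yama,Sanatkumara",
   "Sudas,Divodasa,Trasadasyu,Kurusravana,Pakasthaman,Pururavas,Yayati,Nahusha,Mudgala,Pratardana,Janamejaya,Parikshit",
   "Bharatas,Bharata,Kurus,Panchalas,Turvashas,Krivis,Srinjayas,Somakas,Keshins,Trtsus,Tritsu,Pakthas,Alinas,Bhalanas,Sivas,Visanins,Anu,Druhyu,Matsyas,Yaksus",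
   "Indra,Agni,Soma,Varuna,Vishnu,Rudra,Brahma,Prajapati,Savitr,Pushan,Bhaga,Aryaman,Mitra,Aditi,Ushas,Ashvins,Maruts,Vayu,Parjanya,Apam,Napat,Vishwakarma,Tvastr,Dadhikra,Ahi,Vrtra,Vala,Namuchi,Sushna,Kuyava",
   "Ganga,Yamuna,Saraswati,Sindhu,Vipas,Sutudri,Parushni,Asikni,Marudvridha,Arjikiya,Sushoma,Kurukshetra,Himavant,Meru,Mandara,Uttarakuru,Bharatavarsa",
   "Madhyandina,Kanva,Taittiriya,Kathaka,Kapishthala,Maithrayani,Varaha,Satyayana,Saunaka,Sakala,Baskala,Asvalayana,Sankhayana,Latayayana,Drashtara,Apastamba,Hiranyakesin,Baudhayana,Vaikhanasa"].map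
    (fun s => (PySem.Str.split? s ",").getD [])  -- sep "," ≠ "", so split? is exact here

-- Source B's _category_index: min of the first indicator hit and the first known-name
-- hit (List.findIdx returns the length, 6, when nothing matches — exactly the
-- `next(..., len(...))` default of Source B)
def bCategoryIndex (noun : String) : Nat :=
  min (bIndicators.findIdx (fun inds => inds.any (fun s => PySem.Str.isIn s (PySem.Str.lower noun))))
      (bKnown.findIdx (fun names => names.contains noun))

def categorize_brahmana_nouns_alt (nouns : List (String × Int)) : List (String × List (String × Int)) :=
  -- buckets = [{} for _ in _CATEGORY_NAMES]; buckets[_category_index(noun)][noun] = count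
  -- (the index is always < 7, so List.set / List.getD are exact here)
  let buckets := nouns.foldl
    (fun (bs : List (PySem.Dict String Int)) p =>
      bs.set (bCategoryIndex p.1) ((bs.getD (bCategoryIndex p.1) .empty).insert p.1 p.2))
    (List.replicate 7 PySem.Dict.empty)
  bCategoryNames.zip (buckets.map PySem.Dict.items)

-- ===== PRECONDITION & SPEC =====
def Spec_categorize_brahmana_nouns (nouns : List (String × Int)) (out : List (String × List (String × Int))) : Prop := out = categorize_brahmana_nouns_alt nouns
instance (nouns : List (String × Int)) (out : List (String × List (String × Int))) : Decidable (Spec_categorize_brahmana_nouns nouns out) := by unfold Spec_categorize_brahmana_nouns; infer_instance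

-- ===== CLAIM (what is proved, stated in full; the proofs are below) =====
def Claim_equal_categorize_brahmana_nouns : Prop := ∀ (nouns : List (String × Int)), Dom_categorize_brahmana_nouns nouns → Spec_categorize_brahmana_nouns nouns (categorize_brahmana_nouns nouns)

-- ===== LEMMAS AND PROOFS =====

-- the six branch conditions of A, named for the proof
def cond1 (noun : String) : Bool :=
  sageIndicators.any (fun s => PySem.Str.isIn s (PySem.Str.lower noun)) || knownSages.contains noun
def cond2 (noun : String) : Bool :=
  kingIndicators.any (fun s => PySem.Str.isIn s (PySem.Str.lower noun)) || knownKings.contains noun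
def cond3 (noun : String) : Bool :=
  tribeIndicators.any (fun s => PySem.Str.isIn s (PySem.Str.lower noun)) || knownTribes.contains noun
def cond4 (noun : String) : Bool :=
  deityIndicators.any (fun s => PySem.Str.isIn s (PySem.Str.lower noun)) || knownDeities.contains noun
def cond5 (noun : String) : Bool :=
  placeIndicators.any (fun s => PySem.Str.isIn s (PySem.Str.lower noun)) || knownPlaces.contains noun
def cond6 (noun : String) : Bool :=
  schoolIndicators.any (fun s => PySem.Str.isIn s (PySem.Str.lower noun)) || knownSchools.contains noun

-- B's packed tables split into exactly A's literal lists
set_option maxRecDepth 40000 in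
lemma bIndicators_eval : bIndicators =
    [sageIndicators, kingIndicators, tribeIndicators, deityIndicators,
     placeIndicators, schoolIndicators] := by decide
set_option maxRecDepth 40000 in
lemma bKnown_eval : bKnown =
    [knownSages, knownKings, knownTribes, knownDeities, knownPlaces, knownSchools] := by decide

-- index of the first true entry (length if none) — the shape of Source B's `next`
def firstTrue : List Bool → Nat
  | [] => 0
  | b :: l => if b then 0 else firstTrue l + 1

lemma findIdx_eq_firstTrue {α : Type} (p : α → Bool) (l : List α) :
    l.findIdx p = firstTrue (l.map p) := by
  induction l with
  | nil => simp [firstTrue]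
  | cons a l ih =>
    rw [List.findIdx_cons]
    cases h : p a <;> simp [firstTrue, h, ih]

lemma firstTrue_min : ∀ (ps qs : List Bool), ps.length = qs.length →
    min (firstTrue ps) (firstTrue qs) = firstTrue (List.zipWith (· || ·) ps qs) := by
  intro ps
  induction ps with
  | nil => intro qs h; cases qs <;> simp_all [firstTrue]
  | cons p ps ih =>
    intro qs h
    cases qs with
    | nil => simp at h
    | cons q qs =>
      simp at h
      cases p <;> cases q <;> simp [firstTrue, ← ih qs h]

-- B's numeric index is exactly the first category whose combined condition fires
lemma bCategoryIndex_eq (noun : String) :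
    bCategoryIndex noun =
      firstTrue [cond1 noun, cond2 noun, cond3 noun, cond4 noun, cond5 noun, cond6 noun] := by
  unfold bCategoryIndex
  rw [bIndicators_eval, bKnown_eval, findIdx_eq_firstTrue, findIdx_eq_firstTrue,
    firstTrue_min _ _ (by simp)]
  simp [cond1, cond2, cond3, cond4, cond5, cond6]

-- the list-of-buckets view of A's state
def listOf (a : ACats) : List (PySem.Dict String Int) :=
  [a.sages, a.kings, a.tribes, a.deities, a.places, a.schools, a.other]

lemma step_corr (a : ACats) (noun : String) (count : Int) :
    (listOf a).set (bCategoryIndex noun) (((listOf a).getD (bCategoryIndex noun) .empty).insert noun count)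
      = listOf (aStep a noun count) := by
  by_cases h1 : cond1 noun = true <;> by_cases h2 : cond2 noun = true <;>
    by_cases h3 : cond3 noun = true <;> by_cases h4 : cond4 noun = true <;>
    by_cases h5 : cond5 noun = true <;> by_cases h6 : cond6 noun = true <;>
    · try rw [Bool.not_eq_true] at h1
      try rw [Bool.not_eq_true] at h2
      try rw [Bool.not_eq_true] at h3
      try rw [Bool.not_eq_true] at h4
      try rw [Bool.not_eq_true] at h5
      try rw [Bool.not_eq_true] at h6
      have hidx := bCategoryIndex_eq noun
      simp [h1, h2, h3, h4, h5, h6, firstTrue] at hidx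
      simp only [cond1] at h1; simp only [cond2] at h2; simp only [cond3] at h3
      simp only [cond4] at h4; simp only [cond5] at h5; simp only [cond6] at h6
      simp only [aStep]
      simp only [h1, h2, h3, h4, h5, h6]
      simp [listOf, hidx]

lemma loop_corr (nouns : List (String × Int)) : ∀ a : ACats,
    nouns.foldl
      (fun (bs : List (PySem.Dict String Int)) p =>
        bs.set (bCategoryIndex p.1) ((bs.getD (bCategoryIndex p.1) .empty).insert p.1 p.2))
      (listOf a)
    = listOf (nouns.foldl (fun st p => aStep st p.1 p.2) a) := by
  induction nouns with
  | nil => intro a; rfl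
  | cons p rest ih =>
    intro a
    simp only [List.foldl_cons, step_corr, ih]

-- ===== VERDICT (by name: the statement is the Claim_ definition above) =====
theorem categorize_brahmana_nouns_spec : Claim_equal_categorize_brahmana_nouns := by
  intro nouns _
  unfold Spec_categorize_brahmana_nouns categorize_brahmana_nouns categorize_brahmana_nouns_alt
  have h := loop_corr nouns ⟨.empty, .empty, .empty, .empty, .empty, .empty, .empty⟩
  simp only [listOf] at h
  simp only [List.replicate, h, bCategoryNames, List.map, List.zip]
  rfl
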